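-- pv_equiv track=rewrite | github.com/pablo-prudhommeau/poseidon | backend/src/core/gates/contradictions.py | _non_decreasing
-- ===== SOURCE A (Python) =====
-- from typing import List, Optional
--
-- def _non_decreasing(sequence: List[Optional[int]]) -> bool:
--     """
--     Validate non-decreasing order, ignoring None gaps.
--     """
--     last: Optional[int] = None
--     for value in sequence:
--         if value is None:
--             continue
--         if last is not None and value < last:
--             return False
--         last = value
--     return True
-- ===== SOURCE B (Python) =====
-- from typing import List, Optional
--
-- def _non_decreasing(sequence: List[Optional[int]]) -> bool:
--     """
--     Validate non-decreasing order, ignoring None gaps: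
--     the non-None values are in order iff they equal their own sorted copy.
--     """
--     vals = [v for v in sequence if v is not None]
--     return vals == sorted(vals)
-- ===== Notes on version B (the rewrite author's own statement) =====
-- stated objective: alternative
-- what changed: Replaces A's online scan with a running `last` and early return by a sort-based check: filter out the Nones and compare the remaining values with their sorted copy (a list is non-decreasing iff it equals sorted(itself)).
import Mathlib
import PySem

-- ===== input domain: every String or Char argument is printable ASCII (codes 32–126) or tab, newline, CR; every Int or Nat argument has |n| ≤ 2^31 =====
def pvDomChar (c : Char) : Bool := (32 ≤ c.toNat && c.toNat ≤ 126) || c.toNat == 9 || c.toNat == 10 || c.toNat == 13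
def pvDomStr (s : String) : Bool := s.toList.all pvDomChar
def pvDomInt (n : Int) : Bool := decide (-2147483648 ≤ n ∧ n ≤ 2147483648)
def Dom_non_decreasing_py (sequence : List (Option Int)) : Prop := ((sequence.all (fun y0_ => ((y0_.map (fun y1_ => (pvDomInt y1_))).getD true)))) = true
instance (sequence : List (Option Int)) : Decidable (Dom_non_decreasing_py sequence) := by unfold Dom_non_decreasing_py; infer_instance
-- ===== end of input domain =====

-- B replaces A's online scan (running `last`, early return) by a sort-based check:
-- filter out the Nones and compare the values with their sorted copy.

-- ===== PORT A =====
-- A's loop: structural recursion over the sequence carrying the running `last`.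
def non_decreasing_loop (last : Option Int) : List (Option Int) → Bool
  | [] => true
  | none :: rest => non_decreasing_loop last rest
  | some v :: rest =>
      match last with
      | some l => if v < l then false else non_decreasing_loop (some v) rest
      | none => non_decreasing_loop (some v) rest

def non_decreasing_py (sequence : List (Option Int)) : Bool :=
  non_decreasing_loop none sequence

-- ===== PORT B =====
def non_decreasing_py_alt (sequence : List (Option Int)) : Bool :=
  let vals := sequence.filterMap id
  vals == PySem.List.sorted vals (fun x => x) false

-- ===== PRECONDITION & SPEC =====
def Spec_non_decreasing_py (sequence : List (Option Int)) (out : Bool) : Prop := out = non_decreasing_py_alt sequence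
instance (sequence : List (Option Int)) (out : Bool) : Decidable (Spec_non_decreasing_py sequence out) := by unfold Spec_non_decreasing_py; infer_instance

-- ===== CLAIM =====
def Claim_equal_non_decreasing_py : Prop := ∀ (sequence : List (Option Int)), Dom_non_decreasing_py sequence → Spec_non_decreasing_py sequence (non_decreasing_py sequence)

-- ===== LEMMAS AND PROOFS =====

-- A's loop returns true iff the (last-prefixed) filtered values form a ≤-chain.
theorem loop_eq_chain :
    ∀ (xs : List (Option Int)) (last : Option Int),
      non_decreasing_loop last xs =
        decide (List.IsChain (· ≤ ·) ((last.toList) ++ xs.filterMap id)) := by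
  intro xs
  induction xs with
  | nil =>
      intro last
      cases last <;> simp [non_decreasing_loop]
  | cons h t ih =>
      intro last
      cases h with
      | none => simpa [non_decreasing_loop] using ih last
      | some v =>
          cases last with
          | none => simpa [non_decreasing_loop] using ih (some v)
          | some l =>
              by_cases hlt : v < l
              · have : ¬ (l ≤ v) := by omega
                simp [non_decreasing_loop, hlt, List.isChain_cons_cons, this]
              · have hle : l ≤ v := by omega
                simp [non_decreasing_loop, hlt, ih (some v), List.isChain_cons_cons, hle]

-- a list equals its own (stable) sort iff it is a ≤-chain
theorem chain_iff_sorted_self (vs : List Int) :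
    List.IsChain (· ≤ ·) vs ↔ PySem.List.sorted vs (fun x => x) false = vs := by
  constructor
  · intro h
    have hp : List.Pairwise (fun a b : Int => a ≤ b) vs := List.isChain_iff_pairwise.mp h
    exact PySem.List.sorted_eq_self_of_pairwise (xs := vs) (key := fun x => x) hp
  · intro h
    have hp := PySem.List.sorted_pairwise (xs := vs) (key := fun x => x)
    rw [h] at hp
    have hp' : List.Pairwise (fun a b : Int => a ≤ b) vs := hp
    exact List.isChain_iff_pairwise.mpr hp'

-- ===== VERDICT =====
theorem non_decreasing_py_spec : Claim_equal_non_decreasing_py := by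
  intro sequence _
  show non_decreasing_py sequence = non_decreasing_py_alt sequence
  rw [non_decreasing_py, non_decreasing_py_alt, loop_eq_chain]
  rw [Bool.decide_congr (chain_iff_sorted_self _)]
  simp [Bool.beq_eq_decide_eq, eq_comm]
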